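-- pv_equiv track=rewrite | github.com/Philjf-FCG/RootyTooty | rebuild_hat_runtime_materials.py | choose_pack
-- ===== SOURCE A (Python) =====
-- def choose_pack(packs, required_tokens, fallback_tokens):
--     for key in packs.keys():
--         k = key.lower()
--         if all(t in k for t in required_tokens):
--             return key
--     for key in packs.keys():
--         k = key.lower()
--         if any(t in k for t in fallback_tokens):
--             return key
--     return None
-- ===== SOURCE B (Python) =====
-- def choose_pack(packs, required_tokens, fallback_tokens):
--     req_match = None
--     fb_match = None
--     for key in packs.keys():
--         k = key.lower()
--         if req_match is None and all(t in k for t in required_tokens):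
--             req_match = key
--         if fb_match is None and any(t in k for t in fallback_tokens):
--             fb_match = key
--     return req_match if req_match is not None else fb_match
-- ===== Notes on version B (the rewrite author's own statement) =====
-- stated objective: alternative
-- what changed: Replaces A's two sequential scans over the keys with one pass that tracks the first required-match and the first fallback-match in two variables and picks by priority at the end.
import Mathlib
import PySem

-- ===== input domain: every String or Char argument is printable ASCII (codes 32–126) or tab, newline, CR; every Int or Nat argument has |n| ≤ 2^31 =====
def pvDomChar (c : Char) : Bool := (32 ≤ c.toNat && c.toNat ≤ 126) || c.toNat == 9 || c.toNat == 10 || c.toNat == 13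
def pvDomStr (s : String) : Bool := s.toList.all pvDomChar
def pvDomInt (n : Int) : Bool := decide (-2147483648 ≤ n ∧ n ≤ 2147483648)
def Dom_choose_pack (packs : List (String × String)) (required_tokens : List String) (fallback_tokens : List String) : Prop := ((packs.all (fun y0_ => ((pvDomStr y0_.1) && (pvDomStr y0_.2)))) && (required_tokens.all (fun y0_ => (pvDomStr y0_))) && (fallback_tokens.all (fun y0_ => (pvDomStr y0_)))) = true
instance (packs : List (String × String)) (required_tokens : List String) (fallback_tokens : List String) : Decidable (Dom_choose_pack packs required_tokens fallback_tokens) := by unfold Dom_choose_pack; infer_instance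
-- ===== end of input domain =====

-- B replaces A's two sequential scans over the keys with a single pass that records the
-- first required-match and the first fallback-match and picks by priority at the end
-- (alternative decomposition, same asymptotic cost).

-- ===== PORT A =====
-- first loop: return the first key whose lowercase form contains all required tokens
def chooseReqLoop (keys : List String) (required_tokens : List String) : Option String :=
  match keys with
  | [] => none
  | key :: rest =>
    let k := PySem.Str.lower key
    if required_tokens.all (fun t => PySem.Str.isIn t k) then some key
    else chooseReqLoop rest required_tokens

-- second loop: return the first key whose lowercase form contains any fallback token
def chooseFbLoop (keys : List String) (fallback_tokens : List String) : Option String :=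
  match keys with
  | [] => none
  | key :: rest =>
    let k := PySem.Str.lower key
    if fallback_tokens.any (fun t => PySem.Str.isIn t k) then some key
    else chooseFbLoop rest fallback_tokens

def choose_pack (packs : List (String × String)) (required_tokens : List String) (fallback_tokens : List String) : Option String :=
  let keys := (PySem.Dict.mk packs).keys
  match chooseReqLoop keys required_tokens with
  | some key => some key
  | none => chooseFbLoop keys fallback_tokens

-- ===== PORT B =====
-- single pass: fold over the keys, keeping (req_match, fb_match), each set on first hit only
def chooseStep (required_tokens fallback_tokens : List String)
    (acc : Option String × Option String) (key : String) : Option String × Option String :=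
  let k := PySem.Str.lower key
  let req_match := if acc.1 = none ∧ required_tokens.all (fun t => PySem.Str.isIn t k) then some key else acc.1
  let fb_match := if acc.2 = none ∧ fallback_tokens.any (fun t => PySem.Str.isIn t k) then some key else acc.2
  (req_match, fb_match)

def choose_pack_alt (packs : List (String × String)) (required_tokens : List String) (fallback_tokens : List String) : Option String :=
  let res := ((PySem.Dict.mk packs).keys).foldl (chooseStep required_tokens fallback_tokens) (none, none)
  match res.1 with
  | some key => some key
  | none => res.2

-- ===== PRECONDITION & SPEC =====
def Spec_choose_pack (packs : List (String × String)) (required_tokens : List String) (fallback_tokens : List String) (out : Option String) : Prop := out = choose_pack_alt packs required_tokens fallback_tokens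
instance (packs : List (String × String)) (required_tokens : List String) (fallback_tokens : List String) (out : Option String) : Decidable (Spec_choose_pack packs required_tokens fallback_tokens out) := by unfold Spec_choose_pack; infer_instance

-- ===== CLAIM (what is proved, stated in full; the proofs are below) =====
def Claim_equal_choose_pack : Prop := ∀ (packs : List (String × String)) (required_tokens : List String) (fallback_tokens : List String), Dom_choose_pack packs required_tokens fallback_tokens → Spec_choose_pack packs required_tokens fallback_tokens (choose_pack packs required_tokens fallback_tokens)

-- ===== LEMMAS AND PROOFS =====

-- the fold's two components are "previous value, else first hit in the remaining keys"
theorem foldl_chooseStep (required_tokens fallback_tokens : List String)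
    (keys : List String) (r0 f0 : Option String) :
    keys.foldl (chooseStep required_tokens fallback_tokens) (r0, f0) =
      (r0.orElse (fun _ => chooseReqLoop keys required_tokens),
       f0.orElse (fun _ => chooseFbLoop keys fallback_tokens)) := by
  induction keys generalizing r0 f0 with
  | nil => cases r0 <;> cases f0 <;> rfl
  | cons key rest ih =>
    simp only [List.foldl_cons, chooseStep, chooseReqLoop, chooseFbLoop]
    cases hr : required_tokens.all (fun t => PySem.Str.isIn t (PySem.Str.lower key)) <;>
      cases hf : fallback_tokens.any (fun t => PySem.Str.isIn t (PySem.Str.lower key)) <;>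
        cases r0 <;> cases f0 <;>
          simp [ih, Option.orElse]

-- ===== VERDICT (by name: the statement is the Claim_ definition above) =====
theorem choose_pack_spec : Claim_equal_choose_pack := by
  intro packs required_tokens fallback_tokens _
  unfold Spec_choose_pack choose_pack choose_pack_alt
  rw [foldl_chooseStep]
  simp only [PySem.Dict.keys]
  cases h : chooseReqLoop (packs.map (fun x => x.1)) required_tokens <;>
    simp [Option.orElse]
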